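-- pv_equiv track=rewrite | github.com/cloudforet-io/plugin-prometheus-mon-webhook | src/spaceone/monitoring/manager/event_manager.py | _get_representative_resource
-- ===== SOURCE A (Python) =====
-- def _get_representative_resource(labels):
--     # Select the most specific resource type based on the priority order in 'monitoring_target_resources'
--     monitoring_target_resources = [
--         "resource",
--         "grpc_method",
--         "instance",
--         "pod",
--         "container",
--         "device",
--         "persistentvolumeclaim",
--         "persistentvolume",
--         "deployment",
--         "daemonset",
--         "statefulset",
--         "horizontalpodautoscaler",
--         "service",
--         "controller",
--         "job",
--         "namespace",
--         "phase",
--         "severity",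
--         "alertname",
--         "prometheus",
--     ]
--
--     resource_type = None
--     resource_name = None
--     min_index = float("inf")  # Lower index means higher priority
--
--     for label, value in labels.items():
--         if label in monitoring_target_resources:
--             label_index = monitoring_target_resources.index(label)
--
--             if (
--                 label_index < min_index
--             ):  # Select the resource with the highest priority (lowest index)
--                 min_index = label_index
--                 resource_type = label
--                 resource_name = value
--
--     return resource_type, resource_name
-- ===== SOURCE B (Python) =====
-- def _get_representative_resource(labels):
--     # Iterate the fixed priority list; the first name present in labels is
--     # by construction the highest-priority one.
--     for resource in [
--         "resource",
--         "grpc_method",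
--         "instance",
--         "pod",
--         "container",
--         "device",
--         "persistentvolumeclaim",
--         "persistentvolume",
--         "deployment",
--         "daemonset",
--         "statefulset",
--         "horizontalpodautoscaler",
--         "service",
--         "controller",
--         "job",
--         "namespace",
--         "phase",
--         "severity",
--         "alertname",
--         "prometheus",
--     ]:
--         if resource in labels:
--             return resource, labels[resource]
--     return None, None
-- ===== Notes on version B (the rewrite author's own statement) =====
-- stated objective: faster
-- what changed: Instead of scanning every label while tracking a running minimum priority index (with a membership test and a list .index scan per label), B iterates the fixed priority list once and returns the first name found in the labels dict.
import Mathlib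
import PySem

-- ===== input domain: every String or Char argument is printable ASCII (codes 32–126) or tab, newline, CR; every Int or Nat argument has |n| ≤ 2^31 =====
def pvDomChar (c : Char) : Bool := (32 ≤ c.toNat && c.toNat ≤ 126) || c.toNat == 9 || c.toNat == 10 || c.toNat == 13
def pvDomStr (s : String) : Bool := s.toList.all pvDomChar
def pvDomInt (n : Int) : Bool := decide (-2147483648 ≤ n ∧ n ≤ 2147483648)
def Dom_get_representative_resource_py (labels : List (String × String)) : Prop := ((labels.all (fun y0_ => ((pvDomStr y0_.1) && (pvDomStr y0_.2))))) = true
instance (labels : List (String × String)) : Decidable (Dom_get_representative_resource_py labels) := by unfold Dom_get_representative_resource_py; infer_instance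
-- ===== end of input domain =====

-- B iterates the fixed priority list and returns the first name present in labels,
-- replacing A's scan over all labels with min-index tracking (measured objective: faster).

-- ===== PORT A =====

-- the `monitoring_target_resources` priority list (shared literal of both Pythons)
def pvTargets : List String :=
  ["resource", "grpc_method", "instance", "pod", "container", "device",
   "persistentvolumeclaim", "persistentvolume", "deployment", "daemonset",
   "statefulset", "horizontalpodautoscaler", "service", "controller", "job",
   "namespace", "phase", "severity", "alertname", "prometheus"]

-- loop body of A: state = (resource_type, resource_name, min_index); min_index = none is float('inf')
def pvStepA (st : Option String × Option String × Option Nat) (lv : String × String) :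
    Option String × Option String × Option Nat :=
  if lv.1 ∈ pvTargets then
    match PySem.List.index? pvTargets lv.1 with   -- monitoring_target_resources.index(label)
    | none => st   -- unreachable: guarded by membership
    | some i =>
      match st.2.2 with
      | none => (some lv.1, some lv.2, some i)          -- label_index < inf
      | some m => if i < m then (some lv.1, some lv.2, some i) else st
  else st

def get_representative_resource_py (labels : List (String × String)) : Option String × Option String :=
  let st := labels.foldl pvStepA (none, none, none)
  (st.1, st.2.1)

-- ===== PORT B =====

-- B's loop over the priority list: first name present in the labels dict wins
def pvScanB (targets : List String) (labels : List (String × String)) :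
    Option String × Option String :=
  match targets with
  | [] => (none, none)
  | r :: rs =>
    match (PySem.Dict.mk labels).get? r with     -- `r in labels` / `labels[r]`
    | some v => (some r, some v)
    | none => pvScanB rs labels

def get_representative_resource_py_alt (labels : List (String × String)) : Option String × Option String :=
  pvScanB pvTargets labels

-- ===== PRECONDITION & SPEC =====
def Spec_get_representative_resource_py (labels : List (String × String)) (out : Option String × Option String) : Prop := out = get_representative_resource_py_alt labels
instance (labels : List (String × String)) (out : Option String × Option String) : Decidable (Spec_get_representative_resource_py labels out) := by unfold Spec_get_representative_resource_py; infer_instance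

-- ===== CLAIM (what is proved, stated in full; the proofs are below) =====
def Claim_equal_get_representative_resource_py : Prop := ∀ (labels : List (String × String)), Dom_get_representative_resource_py labels → Spec_get_representative_resource_py labels (get_representative_resource_py labels)

-- ===== LEMMAS AND PROOFS =====

-- generalized A-loop body over an arbitrary rank function (pvStepA = pvStepG for rank = index? pvTargets)
def pvStepG (rank : String → Option Nat) (st : Option String × Option String × Option Nat)
    (lv : String × String) : Option String × Option String × Option Nat :=
  match rank lv.1 with
  | none => st
  | some i =>
    match st.2.2 with
    | none => (some lv.1, some lv.2, some i)
    | some m => if i < m then (some lv.1, some lv.2, some i) else st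

lemma pvStepA_eq_stepG (st : Option String × Option String × Option Nat) (lv : String × String) :
    pvStepA st lv = pvStepG (fun l => PySem.List.index? pvTargets l) st lv := by
  unfold pvStepA pvStepG
  by_cases h : lv.1 ∈ pvTargets
  · simp only [h, if_true]
  · have hnone : PySem.List.index? pvTargets lv.1 = none :=
      (PySem.List.index?_eq_none_iff _ _).mpr h
    rw [PySem.List.index?_eq_idxOf?] at hnone
    simp [h, hnone]

-- a fold whose rank is everywhere none leaves the state unchanged
lemma foldG_none (labels : List (String × String)) (rank : String → Option Nat)
    (hr : ∀ lv ∈ labels, rank lv.1 = none)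
    (st : Option String × Option String × Option Nat) :
    labels.foldl (pvStepG rank) st = st := by
  induction labels generalizing st with
  | nil => rfl
  | cons lv ls ih =>
    have h0 := hr lv (by simp)
    have : pvStepG rank st lv = st := by unfold pvStepG; rw [h0]
    rw [List.foldl_cons, this]
    exact ih (fun x hx => hr x (by simp [hx])) st

-- a state at rank 0 is absorbing
lemma foldG_absorb (labels : List (String × String)) (rank : String → Option Nat)
    (st : Option String × Option String × Option Nat) (h0 : st.2.2 = some 0) :
    labels.foldl (pvStepG rank) st = st := by
  induction labels generalizing st with
  | nil => rfl
  | cons lv ls ih =>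
    have : pvStepG rank st lv = st := by
      unfold pvStepG
      cases hr : rank lv.1 with
      | none => rfl
      | some i => rw [h0]; simp
    rw [List.foldl_cons, this]
    exact ih st h0

-- if some key has rank 0, the fold returns the first such entry
lemma foldG_zero (labels : List (String × String)) (rank : String → Option Nat) (r : String)
    (hiff : ∀ l, rank l = some 0 ↔ l = r) (v : String)
    (hget : (PySem.Dict.mk labels).get? r = some v)
    (st : Option String × Option String × Option Nat) (hst : st.2.2 = none ∨ ∃ m, st.2.2 = some m ∧ 0 < m) :
    labels.foldl (pvStepG rank) st = (some r, some v, some 0) := by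
  induction labels generalizing st with
  | nil => simp [PySem.Dict.get?] at hget
  | cons lv ls ih =>
    rw [List.foldl_cons]
    by_cases hk : lv.1 = r
    · -- this is the first entry with key r: its value is v
      have hv : lv.2 = v := by
        obtain ⟨l1, l2⟩ := lv
        rw [PySem.Dict.get?_mk_cons] at hget
        simp only at hk
        simp [hk] at hget
        exact hget
      have hr0 : rank lv.1 = some 0 := (hiff lv.1).mpr hk
      have hstep : pvStepG rank st lv = (some r, some v, some 0) := by
        unfold pvStepG
        rw [hr0]
        rcases hst with h | ⟨m, hm, hmpos⟩
        · rw [h]; simp [hk, hv]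
        · rw [hm]; simp [hmpos, hk, hv]
      rw [hstep]
      exact foldG_absorb ls rank _ rfl
    · have hget' : (PySem.Dict.mk ls).get? r = some v := by
        obtain ⟨l1, l2⟩ := lv
        rw [PySem.Dict.get?_mk_cons] at hget
        simp only at hk
        simp [hk] at hget
        exact hget
      have hst' : (pvStepG rank st lv).2.2 = none ∨ ∃ m, (pvStepG rank st lv).2.2 = some m ∧ 0 < m := by
        unfold pvStepG
        cases hr : rank lv.1 with
        | none => exact hst
        | some i =>
          have hipos : 0 < i := by
            rcases Nat.eq_zero_or_pos i with h0 | h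
            · exact absurd ((hiff lv.1).mp (h0 ▸ hr)) hk
            · exact h
          rcases hst with h | ⟨m, hm, hmpos⟩
          · rw [h]; exact Or.inr ⟨i, rfl, hipos⟩
          · rw [hm]
            by_cases hlt : i < m
            · simp only [hlt, if_true]; exact Or.inr ⟨i, rfl, hipos⟩
            · simp only [hlt, if_false]; exact Or.inr ⟨m, hm, hmpos⟩
      exact ih hget' _ hst'

-- shifting every rank by one shifts only the stored index
lemma foldG_shift (labels : List (String × String)) (rank rank' : String → Option Nat)
    (hsh : ∀ lv ∈ labels, rank' lv.1 = (rank lv.1).map (· + 1))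
    (a b : Option String) (c : Option Nat) :
    labels.foldl (pvStepG rank') (a, b, c.map (· + 1)) =
      (let st := labels.foldl (pvStepG rank) (a, b, c); (st.1, st.2.1, st.2.2.map (· + 1))) := by
  induction labels generalizing a b c with
  | nil => rfl
  | cons lv ls ih =>
    simp only [List.foldl_cons]
    have hstep : pvStepG rank' (a, b, c.map (· + 1)) lv =
        (let st := pvStepG rank (a, b, c) lv; (st.1, st.2.1, st.2.2.map (· + 1))) := by
      unfold pvStepG
      rw [hsh lv (by simp)]
      cases hr : rank lv.1 with
      | none => rfl
      | some i =>
        cases c with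
        | none => rfl
        | some m =>
          simp only [Option.map_some]
          by_cases hlt : i < m
          · simp [hlt]
          · have hlt' : ¬ i + 1 < m + 1 := fun hc => hlt (Nat.lt_of_succ_lt_succ hc)
            simp [hlt, hlt']
    rw [hstep]
    obtain ⟨a', b', c'⟩ := pvStepG rank (a, b, c) lv
    exact ih (fun x hx => hsh x (List.mem_cons_of_mem _ hx)) a' b' c'

-- main lemma: the generalized A-fold projects to B's priority-list scan
lemma foldG_eq_scanB (targets : List String) (labels : List (String × String)) :
    (let st := labels.foldl (pvStepG (fun l => PySem.List.index? targets l)) (none, none, none)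
     ((st.1, st.2.1) : Option String × Option String)) = pvScanB targets labels := by
  induction targets generalizing labels with
  | nil =>
    rw [foldG_none labels _ (fun lv _ => (PySem.List.index?_eq_none_iff _ _).mpr (by simp))]
    rfl
  | cons r rs ih =>
    unfold pvScanB
    cases hget : (PySem.Dict.mk labels).get? r with
    | some v =>
      have hiff : ∀ l, PySem.List.index? (r :: rs) l = some 0 ↔ l = r := by
        intro l
        by_cases h : r = l
        · subst h
          rw [PySem.List.index?_cons_self]
          simp
        · rw [PySem.List.index?_cons_of_ne rs h]
          constructor
          · intro hc
            cases hx : PySem.List.index? rs l with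
            | none => rw [hx] at hc; simp at hc
            | some j => rw [hx] at hc; simp at hc
          · intro he; exact absurd he.symm h
      rw [foldG_zero labels _ r hiff v hget (none, none, none) (Or.inl rfl)]
    | none =>
      -- r is not a key of labels, so every key's rank in r :: rs is the rs-rank shifted by one
      have hnk : ∀ lv ∈ labels, lv.1 ≠ r := by
        intro lv hlv he
        have hmem : r ∈ (PySem.Dict.mk labels).keys := by
          simp only [PySem.Dict.keys]
          exact List.mem_map.mpr ⟨lv, hlv, he⟩
        exact (PySem.Dict.get?_eq_none_iff_not_mem_keys _ _).mp hget hmem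
      have hsh : ∀ lv ∈ labels, PySem.List.index? (r :: rs) lv.1 =
          (PySem.List.index? rs lv.1).map (· + 1) := by
        intro lv hlv
        exact PySem.List.index?_cons_of_ne rs (fun he => hnk lv hlv he.symm)
      have := foldG_shift labels (fun l => PySem.List.index? rs l)
        (fun l => PySem.List.index? (r :: rs) l) hsh none none none
      simp only [Option.map_none] at this
      rw [this]
      simpa using ih labels

-- ===== VERDICT (by name: the statement is the Claim_ definition above) =====
theorem get_representative_resource_py_spec : Claim_equal_get_representative_resource_py := by
  intro labels _
  unfold Spec_get_representative_resource_py get_representative_resource_py get_representative_resource_py_alt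
  have hf : pvStepA = pvStepG (fun l => PySem.List.index? pvTargets l) := by
    funext st lv; exact pvStepA_eq_stepG st lv
  rw [hf]
  exact foldG_eq_scanB pvTargets labels
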